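-- pv_equiv track=rewrite | github.com/Nayekah/CTF-Write-Ups | wu-local/cj2026/quals/theabsoluteidol/solve.py | poly_w_minus_y_pow_e_minus_c
-- ===== SOURCE A (Python) =====
-- from math import comb
--
-- def poly_trim(p):
--     while p and p[-1] == 0:
--         p.pop()
--     return p
--
-- def poly_w_minus_y_pow_e_minus_c(e, w, cval, mod):
--     p = [0] * (e + 1)
--     for j in range(e + 1):
--         coef = comb(e, j) * pow(w, e - j, mod) % mod
--         if j & 1:
--             coef = (-coef) % mod
--         p[j] = coef
--     p[0] = (p[0] - cval) % mod
--     return poly_trim(p)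
-- ===== SOURCE B (Python) =====
-- def poly_w_minus_y_pow_e_minus_c(e, w, cval, mod):
--     # Expand (w - y)^e by repeated multiplication with the linear factor (w - y):
--     # after k rounds p holds the coefficients of (w - y)^k mod `mod`.
--     # No binomial coefficients and no modular exponentiation are ever computed.
--     p = [1 % mod]
--     for _ in range(e):
--         p = [(w * (p[i] if i < len(p) else 0) - (p[i - 1] if i > 0 else 0)) % mod
--              for i in range(len(p) + 1)]
--     p[0] = (p[0] - cval) % mod
--     while p and p[-1] == 0:
--         p.pop()
--     return p
-- ===== Notes on version B (the rewrite author's own statement) =====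
-- stated objective: alternative
-- what changed: Instead of evaluating the binomial formula (comb(e,j) and pow(w,e-j,mod) per coefficient), B expands (w - y)^e by e successive polynomial multiplications with the linear factor (w - y), carrying the whole coefficient list reduced mod `mod` at each round.
import Mathlib
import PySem

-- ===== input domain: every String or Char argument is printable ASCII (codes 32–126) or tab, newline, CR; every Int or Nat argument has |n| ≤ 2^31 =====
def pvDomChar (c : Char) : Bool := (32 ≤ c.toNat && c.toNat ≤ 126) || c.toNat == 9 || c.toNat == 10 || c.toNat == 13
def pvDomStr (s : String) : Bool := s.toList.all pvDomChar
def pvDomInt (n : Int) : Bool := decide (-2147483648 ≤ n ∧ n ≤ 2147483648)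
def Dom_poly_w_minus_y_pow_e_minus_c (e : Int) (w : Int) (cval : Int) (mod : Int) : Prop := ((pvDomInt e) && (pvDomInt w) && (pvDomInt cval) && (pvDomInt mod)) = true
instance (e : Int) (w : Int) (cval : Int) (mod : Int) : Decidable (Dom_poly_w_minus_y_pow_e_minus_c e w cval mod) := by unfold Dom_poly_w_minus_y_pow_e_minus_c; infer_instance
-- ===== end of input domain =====

-- B builds the coefficient list by a different algorithm: it expands (w - y)^e by e successive
-- multiplications with the linear factor (w - y), so no binomial coefficient and no modular
-- exponentiation is ever computed.  Objective: alternative (same O(e^2) cost class as A).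

-- ===== PORT A =====
-- poly_trim: while p and p[-1] == 0: p.pop()
def polyTrim (p : List Int) : List Int :=
  if h : p.getLast? = some 0 then polyTrim p.dropLast else p
termination_by p.length
decreasing_by
  cases p with
  | nil => simp at h
  | cons a l => simp [List.length_dropLast]

def poly_w_minus_y_pow_e_minus_c (e : Int) (w : Int) (cval : Int) (mod : Int) : List Int :=
  -- p = [0] * (e + 1)
  let p0 : List Int := List.replicate (e + 1).toNat 0
  -- for j in range(e+1): coef = comb(e,j) * pow(w, e-j, mod) % mod; if j & 1: coef = (-coef) % mod; p[j] = coef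
  let p1 := (PySem.List.pyRange 0 (e + 1) 1).foldl (fun p j =>
      PySem.List.pySetD p j
        (let coef := PySem.Int.mod ((Nat.choose e.toNat j.toNat : Int) * PySem.Int.powMod w (e - j).toNat mod) mod
         if PySem.Int.band j 1 ≠ 0 then PySem.Int.mod (-coef) mod else coef)) p0
  -- p[0] = (p[0] - cval) % mod   (in range under Pre_: e ≥ 0)
  let p2 := PySem.List.pySetD p1 0 (PySem.Int.mod (PySem.List.pyGetD p1 0 0 - cval) mod)
  polyTrim p2

-- ===== PORT B =====
def poly_w_minus_y_pow_e_minus_c_alt (e : Int) (w : Int) (cval : Int) (mod : Int) : List Int :=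
  -- p = [1 % mod]
  -- for _ in range(e): p = [(w*(p[i] if i<len(p) else 0) - (p[i-1] if i>0 else 0)) % mod for i in range(len(p)+1)]
  let p := (PySem.List.pyRange 0 e 1).foldl
    (fun (p : List Int) _ =>
      (List.range (p.length + 1)).map (fun i =>
        PySem.Int.mod (w * (if i < p.length then p.getD i 0 else 0)
                       - (if 0 < i then p.getD (i - 1) 0 else 0)) mod))
    [PySem.Int.mod 1 mod]
  -- p[0] = (p[0] - cval) % mod   (in range under Pre_: e ≥ 0, so p is nonempty)
  let out := PySem.List.pySetD p 0 (PySem.Int.mod (PySem.List.pyGetD p 0 0 - cval) mod)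
  -- while p and p[-1] == 0: p.pop()
  polyTrim out

-- ===== PRECONDITION & SPEC =====
-- A raises outside Pre_: IndexError at p[0] when e < 0 (p is empty), ValueError from pow when mod = 0.
def Pre_poly_w_minus_y_pow_e_minus_c (e : Int) (w : Int) (cval : Int) (mod : Int) : Prop :=
  0 ≤ e ∧ mod ≠ 0
instance (e : Int) (w : Int) (cval : Int) (mod : Int) : Decidable (Pre_poly_w_minus_y_pow_e_minus_c e w cval mod) := by unfold Pre_poly_w_minus_y_pow_e_minus_c; infer_instance

def pvWitness_poly_w_minus_y_pow_e_minus_c : Int × Int × Int × Int := (3, 2, 5, 7)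

def Spec_poly_w_minus_y_pow_e_minus_c (e : Int) (w : Int) (cval : Int) (mod : Int) (out : List Int) : Prop := out = poly_w_minus_y_pow_e_minus_c_alt e w cval mod
instance (e : Int) (w : Int) (cval : Int) (mod : Int) (out : List Int) : Decidable (Spec_poly_w_minus_y_pow_e_minus_c e w cval mod out) := by unfold Spec_poly_w_minus_y_pow_e_minus_c; infer_instance

-- ===== CLAIM (what is proved, stated in full; the proofs are below) =====
def Claim_equal_poly_w_minus_y_pow_e_minus_c : Prop := ∀ (e : Int) (w : Int) (cval : Int) (mod : Int), Dom_poly_w_minus_y_pow_e_minus_c e w cval mod → Pre_poly_w_minus_y_pow_e_minus_c e w cval mod → Spec_poly_w_minus_y_pow_e_minus_c e w cval mod (poly_w_minus_y_pow_e_minus_c e w cval mod)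

-- ===== LEMMAS AND PROOFS =====

-- the exact integer coefficient of y^j in (w - y)^k
def vC (w : Int) (k j : Nat) : Int := (-1 : Int) ^ j * (Nat.choose k j : Int) * w ^ (k - j)

-- Python % depends only on the residue class
theorem pymod_congr {a b : Int} (m : Int) (h : m ∣ a - b) :
    PySem.Int.mod a m = PySem.Int.mod b m := by
  obtain ⟨k, hk⟩ := h
  have hab : a = b + m * k := by linarith
  subst hab
  show Int.fmod (b + m * k) m = Int.fmod b m
  exact Int.add_mul_fmod_self_left b m k

theorem dvd_sub_mod (m a : Int) : m ∣ PySem.Int.mod a m - a := by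
  have := PySem.Int.floordiv_mul_add_mod a m
  exact ⟨-(PySem.Int.floordiv a m), by linarith⟩

-- the linear-factor recurrence is exact on the integer coefficients
theorem vC_step (w : Int) (k i : Nat) (hi : i ≤ k + 1) :
    vC w (k + 1) i
      = w * (if i < k + 1 then vC w k i else 0) - (if 0 < i then vC w k (i - 1) else 0) := by
  rcases Nat.eq_zero_or_pos i with rfl | hpos
  · simp [vC, pow_succ, mul_comm]
  · obtain ⟨j, rfl⟩ : ∃ j, i = j + 1 := ⟨i - 1, by omega⟩
    rcases Nat.lt_or_ge j k with hjk | hjk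
    · have h1 : j + 1 < k + 1 := by omega
      have h2 : k + 1 - (j + 1) = k - j := by omega
      have h3 : k - (j + 1) + 1 = k - j := by omega
      simp only [if_pos h1, if_pos (Nat.succ_pos j), Nat.add_sub_cancel, vC,
        Nat.choose_succ_succ, h2]
      push_cast
      have hw : w * w ^ (k - (j + 1)) = w ^ (k - j) := by
        rw [← pow_succ', h3]
      calc (-1:Int) ^ (j+1) * ((Nat.choose k j : Int) + Nat.choose k (j+1)) * w ^ (k - j)
          = w * ((-1:Int)^(j+1) * (Nat.choose k (j+1) : Int) * w ^ (k - (j+1)))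
            - (-1:Int)^j * (Nat.choose k j : Int) * w ^ (k - j) := by
            rw [← hw]; ring
      _ = _ := by ring
    · have hj : j = k := by omega
      subst hj
      have h1 : ¬ (j + 1 < j + 1) := by omega
      simp [vC, pow_succ]

-- one B-round sends the (w-y)^k coefficient table to the (w-y)^(k+1) table
theorem b_round (w m : Int) (k : Nat) :
    (List.range (((List.range (k+1)).map (fun j => PySem.Int.mod (vC w k j) m)).length + 1)).map
      (fun i =>
        let p := (List.range (k+1)).map (fun j => PySem.Int.mod (vC w k j) m)
        PySem.Int.mod (w * (if i < p.length then p.getD i 0 else 0)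
                       - (if 0 < i then p.getD (i - 1) 0 else 0)) m)
    = (List.range (k + 2)).map (fun j => PySem.Int.mod (vC w (k+1) j) m) := by
  have hlen : ((List.range (k+1)).map (fun j => PySem.Int.mod (vC w k j) m)).length = k + 1 := by
    simp
  rw [hlen]
  apply List.map_congr_left
  intro i hi
  have hik : i < k + 2 := List.mem_range.mp hi
  simp only [hlen]
  have hget : ∀ l : Nat, l < k + 1 →
      ((List.range (k+1)).map (fun j => PySem.Int.mod (vC w k j) m)).getD l 0
        = PySem.Int.mod (vC w k l) m := fun l hl =>
    PySem.List.getD_map_range _ _ _ _ hl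
  have hstep := vC_step w k i (by omega)
  by_cases h1 : i < k + 1 <;> by_cases h2 : 0 < i
  · rw [if_pos h1, if_pos h2, hget i h1, hget (i-1) (by omega)]
    apply pymod_congr
    rw [if_pos h1, if_pos h2] at hstep
    rw [hstep]
    have d1 := dvd_sub_mod m (vC w k i)
    have d2 := dvd_sub_mod m (vC w k (i-1))
    have : w * PySem.Int.mod (vC w k i) m - PySem.Int.mod (vC w k (i-1)) m -
        (w * vC w k i - vC w k (i-1))
        = w * (PySem.Int.mod (vC w k i) m - vC w k i)
          - (PySem.Int.mod (vC w k (i-1)) m - vC w k (i-1)) := by ring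
    rw [this]
    exact dvd_sub (Dvd.dvd.mul_left d1 w) d2
  · rw [if_pos h1, if_neg h2, hget i h1]
    apply pymod_congr
    rw [if_pos h1, if_neg h2] at hstep
    rw [hstep]
    have : w * PySem.Int.mod (vC w k i) m - 0 - (w * vC w k i - 0)
        = w * (PySem.Int.mod (vC w k i) m - vC w k i) := by ring
    rw [this]
    exact Dvd.dvd.mul_left (dvd_sub_mod m (vC w k i)) w
  · rw [if_neg h1, if_pos h2, hget (i-1) (by omega)]
    apply pymod_congr
    rw [if_neg h1, if_pos h2] at hstep
    rw [hstep]
    have : w * 0 - PySem.Int.mod (vC w k (i-1)) m - (w * 0 - vC w k (i-1))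
        = -(PySem.Int.mod (vC w k (i-1)) m - vC w k (i-1)) := by ring
    rw [this]
    exact dvd_neg.mpr (dvd_sub_mod m (vC w k (i-1)))
  · omega

-- B's whole loop: after iterating over pyRange a b 1 (length n) starting from the table of
-- (w-y)^k, p is the table of (w-y)^(k+n)
theorem b_loop (w m : Int) :
    ∀ (n : Nat) (k : Nat) (a b : Int), (b - a).toNat = n →
    (PySem.List.pyRange a b 1).foldl
      (fun (p : List Int) _ =>
        (List.range (p.length + 1)).map (fun i =>
          PySem.Int.mod (w * (if i < p.length then p.getD i 0 else 0)
                         - (if 0 < i then p.getD (i - 1) 0 else 0)) m))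
      ((List.range (k+1)).map (fun j => PySem.Int.mod (vC w k j) m))
    = (List.range (k + n + 1)).map (fun j => PySem.Int.mod (vC w (k + n) j) m) := by
  intro n
  induction n with
  | zero =>
    intro k a b hn
    have : b ≤ a := by omega
    simp [PySem.List.pyRange_one_eq_nil this]
  | succ n ih =>
    intro k a b hn
    have hab : a < b := by omega
    rw [PySem.List.pyRange_one_cons hab, List.foldl_cons, b_round w m k]
    rw [show k + 2 = (k + 1) + 1 by omega, show k + (n + 1) = (k + 1) + n by omega]
    exact ih (k + 1) (a + 1) b (by omega)

-- A's loop: writing f j at index j, for j = a .. b-1, into pre ++ suf with pre.length = a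
theorem foldl_set_eq (f : Int → Int) :
    ∀ (n : Nat) (a b : Int) (pre suf : List Int), 0 ≤ a → pre.length = a.toNat →
      suf.length = n → (b - a).toNat = n →
      (PySem.List.pyRange a b 1).foldl (fun p j => PySem.List.pySetD p j (f j)) (pre ++ suf)
        = pre ++ (PySem.List.pyRange a b 1).map f := by
  intro n
  induction n with
  | zero =>
    intro a b pre suf ha hpre hsuf hn
    have hb : b ≤ a := by omega
    rcases List.length_eq_zero_iff.mp hsuf with rfl
    simp [PySem.List.pyRange_one_eq_nil hb]
  | succ n ih =>
    intro a b pre suf ha hpre hsuf hn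
    have hab : a < b := by omega
    rcases suf with _ | ⟨s, suf'⟩
    · simp at hsuf
    · rw [PySem.List.pyRange_one_cons hab]
      simp only [List.foldl_cons, List.map_cons]
      have hset : PySem.List.pySetD (pre ++ s :: suf') a (f a) = (pre ++ [f a]) ++ suf' := by
        rw [PySem.List.pySetD_of_nonneg _ _ ha]
        rw [List.set_append_right _ _ (by omega)]
        simp [hpre]
      rw [hset, ih (a + 1) b (pre ++ [f a]) suf' (by omega)
            (by simp [hpre]; omega) (by simpa using hsuf) (by omega)]
      simp

-- A's per-index coefficient is the Python residue of the exact coefficient vC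
theorem a_coef_eq (e w m : Int) (he : 0 ≤ e) (j : Int) (hj0 : 0 ≤ j) (hje : j ≤ e) :
    (let coef := PySem.Int.mod ((Nat.choose e.toNat j.toNat : Int) * PySem.Int.powMod w (e - j).toNat m) m
     if PySem.Int.band j 1 ≠ 0 then PySem.Int.mod (-coef) m else coef)
    = PySem.Int.mod (vC w e.toNat j.toNat) m := by
  have hpow : (e - j).toNat = e.toNat - j.toNat := by omega
  rw [PySem.Int.powMod_eq, PySem.Int.band_one]
  have hparity : PySem.Int.mod j 2 = ((j.toNat % 2 : Nat) : Int) := by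
    have hj : j = ((j.toNat : Nat) : Int) := by omega
    rw [hj, show (2:Int) = ((2:Nat) : Int) from rfl, PySem.Int.mod_natCast]
    simp
  set C : Int := (Nat.choose e.toNat j.toNat : Int) with hC
  set P : Int := w ^ (e - j).toNat with hP
  have hinner : PySem.Int.mod (C * PySem.Int.mod P m) m = PySem.Int.mod (C * P) m := by
    apply pymod_congr
    have : C * PySem.Int.mod P m - C * P = C * (PySem.Int.mod P m - P) := by ring
    rw [this]; exact Dvd.dvd.mul_left (dvd_sub_mod m P) C
  by_cases hodd : j.toNat % 2 = 1
  · have hne : PySem.Int.mod j 2 ≠ 0 := by rw [hparity, hodd]; decide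
    simp only [if_pos hne]
    have : PySem.Int.mod (-(PySem.Int.mod (C * PySem.Int.mod P m) m)) m
        = PySem.Int.mod (-(C * P)) m := by
      apply pymod_congr
      have h1 := dvd_sub_mod m (C * PySem.Int.mod P m)
      have h2 : m ∣ C * PySem.Int.mod P m - C * P := by
        have : C * PySem.Int.mod P m - C * P = C * (PySem.Int.mod P m - P) := by ring
        rw [this]; exact Dvd.dvd.mul_left (dvd_sub_mod m P) C
      have : -(PySem.Int.mod (C * PySem.Int.mod P m) m) - -(C * P)
          = -((PySem.Int.mod (C * PySem.Int.mod P m) m - C * PySem.Int.mod P m)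
              + (C * PySem.Int.mod P m - C * P)) := by ring
      rw [this]
      exact dvd_neg.mpr (dvd_add h1 h2)
    rw [this]
    congr 1
    unfold vC
    rw [Odd.neg_one_pow (Nat.odd_iff.mpr hodd), hP, hC, hpow]
    ring
  · have hev : j.toNat % 2 = 0 := by omega
    have hne : ¬ PySem.Int.mod j 2 ≠ 0 := by rw [hparity, hev]; simp
    simp only [if_neg hne]
    rw [hinner]
    congr 1
    unfold vC
    rw [Even.neg_one_pow (Nat.even_iff.mpr hev), hP, hC, hpow]
    ring

-- the two pre-trim coefficient lists agree
theorem lists_eq (e w m : Int) (he : 0 ≤ e) :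
    (PySem.List.pyRange 0 (e + 1) 1).foldl (fun p j =>
        PySem.List.pySetD p j
          (let coef := PySem.Int.mod ((Nat.choose e.toNat j.toNat : Int) * PySem.Int.powMod w (e - j).toNat m) m
           if PySem.Int.band j 1 ≠ 0 then PySem.Int.mod (-coef) m else coef))
      (List.replicate (e + 1).toNat 0)
    = (PySem.List.pyRange 0 e 1).foldl
        (fun (p : List Int) _ =>
          (List.range (p.length + 1)).map (fun i =>
            PySem.Int.mod (w * (if i < p.length then p.getD i 0 else 0)
                           - (if 0 < i then p.getD (i - 1) 0 else 0)) m))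
        [PySem.Int.mod 1 m] := by
  -- A side: the list of coefficients
  have hA := foldl_set_eq (fun j =>
      let coef := PySem.Int.mod ((Nat.choose e.toNat j.toNat : Int) * PySem.Int.powMod w (e - j).toNat m) m
      if PySem.Int.band j 1 ≠ 0 then PySem.Int.mod (-coef) m else coef)
    (e + 1).toNat 0 (e + 1) [] (List.replicate (e + 1).toNat 0)
    le_rfl rfl (by simp) (by omega)
  simp only [List.nil_append] at hA
  rw [hA]
  -- B side: the starting table [1 % m] is the (w-y)^0 table
  have hstart : [PySem.Int.mod 1 m]
      = (List.range (0+1)).map (fun j => PySem.Int.mod (vC w 0 j) m) := by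
    simp [vC]
  rw [hstart, b_loop w m e.toNat 0 0 e (by omega)]
  -- both sides are now maps over ranges; identify them pointwise
  have hcast : e + 1 = (((e + 1).toNat : Nat) : Int) := by omega
  rw [hcast, PySem.List.pyRange_zero_natCast, List.map_map]
  have hlen : (e+1).toNat = 0 + e.toNat + 1 := by omega
  rw [← hlen]
  apply List.map_congr_left
  intro k hk
  have hk' : k < (e+1).toNat := List.mem_range.mp hk
  have := a_coef_eq e w m he (k : Int) (by omega) (by omega)
  simpa using this

-- ===== VERDICT (by name: the statement is the Claim_ definition above) =====
theorem poly_w_minus_y_pow_e_minus_c_spec : Claim_equal_poly_w_minus_y_pow_e_minus_c := by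
  intro e w cval mod _ hpre
  unfold Spec_poly_w_minus_y_pow_e_minus_c
  unfold poly_w_minus_y_pow_e_minus_c poly_w_minus_y_pow_e_minus_c_alt
  dsimp only
  rw [lists_eq e w mod hpre.1]
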